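-- pv_equiv track=rewrite | github.com/tlgus626/CodingTest_Study | KimSihyeon/0921_2_n^2 배열 자르기.py | myftn
-- ===== SOURCE A (Python) =====
-- def myftn(n, x):
--     res = [0] * n
--     for j in range(n):
--         if j <= x:
--             res[j] = x + 1
--         else:
--             res[j] = res[j - 1] + 1
--     return res
-- ===== SOURCE B (Python) =====
-- def myftn(n, x):
--     k = max(0, min(n, x + 1))
--     return [x + 1] * k + list(range(k + 1, n + 1))
-- ===== Notes on version B (the rewrite author's own statement) =====
-- stated objective: simpler
-- what changed: Replaces the sequential loop with the res[j-1]+1 recurrence by direct construction: a replicated block of x+1 of clamped length k = clamp(x+1,0,n) concatenated with range(k+1, n+1), with no per-index loop or branch at all.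
import Mathlib
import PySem

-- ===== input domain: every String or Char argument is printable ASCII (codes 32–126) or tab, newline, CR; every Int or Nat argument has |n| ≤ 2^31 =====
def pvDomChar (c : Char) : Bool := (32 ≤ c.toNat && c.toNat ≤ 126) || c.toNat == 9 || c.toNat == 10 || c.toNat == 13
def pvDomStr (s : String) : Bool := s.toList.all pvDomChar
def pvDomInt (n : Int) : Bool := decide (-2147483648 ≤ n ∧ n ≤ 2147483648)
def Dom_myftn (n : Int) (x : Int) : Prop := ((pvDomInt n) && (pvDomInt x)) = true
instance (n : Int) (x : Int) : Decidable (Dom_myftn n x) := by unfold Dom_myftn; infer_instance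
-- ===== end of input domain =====

-- B replaces A's sequential res[j-1]+1 recurrence by direct construction:
-- a replicated block of x+1 followed by a literal range (simpler, no loop).

-- ===== PORT A =====
-- res[j] = v with j ∈ range(n) is always in range: pySetD is exact here; res[j-1]
-- (negative index -1 at j=0) is always in range for n > 0: pyGetD … 0 is exact here.
def myftn (n : Int) (x : Int) : List Int :=
  (PySem.List.pyRange 0 n 1).foldl
    (fun res j =>
      if j ≤ x then PySem.List.pySetD res j (x + 1)
      else PySem.List.pySetD res j (PySem.List.pyGetD res (j - 1) 0 + 1))
    (List.replicate n.toNat 0)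

-- ===== PORT B =====
def myftn_alt (n : Int) (x : Int) : List Int :=
  let k := max 0 (min n (x + 1))
  List.replicate k.toNat (x + 1) ++ PySem.List.pyRange (k + 1) (n + 1) 1

-- ===== PRECONDITION & SPEC =====
def Spec_myftn (n : Int) (x : Int) (out : List Int) : Prop := out = myftn_alt n x
instance (n : Int) (x : Int) (out : List Int) : Decidable (Spec_myftn n x out) := by unfold Spec_myftn; infer_instance

-- ===== CLAIM (what is proved, stated in full; the proofs are below) =====
def Claim_equal_myftn : Prop := ∀ (n : Int) (x : Int), Dom_myftn n x → Spec_myftn n x (myftn n x)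

-- ===== LEMMAS AND PROOFS =====

-- Loop invariant for A: after processing indices 0..m-1 the state is the
-- closed-form prefix followed by the untouched zeros.
lemma myftn_loop_inv (x : Int) (L m : Nat) (hm : m ≤ L) :
    ((List.range m).map (fun (k : Nat) => (k : Int))).foldl
      (fun res j =>
        if j ≤ x then PySem.List.pySetD res j (x + 1)
        else PySem.List.pySetD res j (PySem.List.pyGetD res (j - 1) 0 + 1))
      (List.replicate L 0)
    = (List.range m).map (fun (k : Nat) => if (k : Int) ≤ x then x + 1 else (k : Int) + 1)
      ++ List.replicate (L - m) 0 := by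
  induction m with
  | zero => simp
  | succ m ih =>
    have hmL : m < L := hm
    rw [List.range_succ]
    simp only [List.map_append, List.foldl_append]
    rw [ih (le_of_lt hmL)]
    set pre := (List.range m).map (fun (k : Nat) => if (k : Int) ≤ x then x + 1 else (k : Int) + 1) with hpre
    have hprelen : pre.length = m := by simp [hpre]
    have hrep : List.replicate (L - m) (0 : Int) = 0 :: List.replicate (L - (m + 1)) 0 := by
      have : L - m = (L - (m + 1)) + 1 := by omega
      rw [this, List.replicate_succ]
    simp only [List.map_cons, List.map_nil, List.foldl_cons, List.foldl_nil]
    by_cases hx : (m : Int) ≤ x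
    · rw [if_pos hx]
      rw [PySem.List.pySetD_natCast, hrep]
      rw [show (m : Nat) = pre.length from hprelen.symm]
      rw [List.set_append_right _ _ (le_refl _)]
      simp
      omega
    · rw [if_neg hx]
      have hval : PySem.List.pyGetD (pre ++ List.replicate (L - m) (0 : Int)) ((m : Int) - 1) 0 + 1
          = (m : Int) + 1 := by
        cases m with
        | zero =>
          simp only [Nat.cast_zero, zero_sub, hpre, List.range_zero, List.map_nil, List.nil_append]
          rw [show (-1 : Int) = -((1 : Nat) : Int) by norm_num]
          rw [PySem.List.pyGetD, PySem.List.pyGet?_neg_natCast]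
          · simp [hmL]
          · norm_num
          · simp; omega
        | succ k =>
          rw [show ((Nat.succ k : Nat) : Int) - 1 = ((k : Nat) : Int) by push_cast; ring]
          rw [PySem.List.pyGetD, PySem.List.pyGet?_natCast]
          have hk : k < pre.length := by omega
          rw [List.getElem?_append_left hk]
          simp only [hpre, List.getElem?_map, List.getElem?_range (by omega : k < k + 1)]
          have hkx : ¬ ((k : Int) ≤ x) ∨ (k : Int) = x := by
            by_cases h : (k : Int) ≤ x
            · right
              have : ¬ ((k : Int) + 1 ≤ x) := by push_cast at hx; omega
              omega
            · left; exact h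
          rcases hkx with h | h
          · simp [h]
          · simp [← h]
      rw [hval, PySem.List.pySetD_natCast, hrep]
      rw [show (m : Nat) = pre.length from hprelen.symm]
      rw [List.set_append_right _ _ (le_refl _)]
      simp
      omega

-- The closed-form prefix equals B's block-plus-range construction.
lemma closed_form_eq_blocks (x : Int) (L : Nat) :
    (List.range L).map (fun (k : Nat) => if (k : Int) ≤ x then x + 1 else (k : Int) + 1)
    = List.replicate (max 0 (min (L : Int) (x + 1))).toNat (x + 1)
      ++ PySem.List.pyRange (max 0 (min (L : Int) (x + 1)) + 1) ((L : Int) + 1) 1 := by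
  set k : Int := max 0 (min (L : Int) (x + 1)) with hk
  have hk0 : 0 ≤ k := le_max_left _ _
  have hkL : k ≤ (L : Int) := by
    rcases le_total 0 (min (L : Int) (x + 1)) with h | h
    · rw [hk, max_eq_right h]; exact min_le_left _ _
    · rw [hk, max_eq_left h]; exact Nat.cast_nonneg L
  apply List.ext_getElem
  · simp [PySem.List.length_pyRange_one]; omega
  · intro i h1 h2
    have hiL : i < L := by simpa using h1
    rw [List.getElem_map, List.getElem_range]
    by_cases hik : i < k.toNat
    · rw [List.getElem_append_left (by simpa using hik)]
      rw [List.getElem_replicate]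
      have : (i : Int) ≤ x := by
        have : (i : Int) < k := by exact_mod_cast Int.lt_toNat.mp hik
        omega
      rw [if_pos this]
    · have hilen : (List.replicate k.toNat (x + 1)).length ≤ i := by
        simpa using Nat.le_of_not_lt hik
      rw [List.getElem_append_right hilen]
      rw [PySem.List.getElem_pyRange_one]
      have hki : k ≤ (i : Int) := by
        have := Nat.le_of_not_lt hik
        omega
      have hix : ¬ ((i : Int) ≤ x) := by
        intro hle
        have : (i : Int) < k := by
          have h1 : (i : Int) + 1 ≤ x + 1 := by omega
          have h2 : (i : Int) + 1 ≤ (L : Int) := by exact_mod_cast Nat.succ_le_of_lt hiL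
          omega
        omega
      rw [if_neg hix]
      simp only [List.length_replicate]
      have : k + 1 + ((i : Int) - k.toNat) = (i : Int) + 1 := by
        rw [Int.toNat_of_nonneg hk0]; ring
      omega

-- ===== VERDICT (by name: the statement is the Claim_ definition above) =====
theorem myftn_spec : Claim_equal_myftn := by
  intro n x _
  unfold Spec_myftn myftn myftn_alt
  rw [PySem.List.pyRange_one]
  simp only [zero_add, Int.sub_zero]
  rw [myftn_loop_inv x n.toNat n.toNat (le_refl _)]
  simp only [Nat.sub_self, List.replicate_zero, List.append_nil]
  rcases le_or_gt 0 n with hn | hn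
  · rw [closed_form_eq_blocks x n.toNat, Int.toNat_of_nonneg hn]
  · have h0 : n.toNat = 0 := Int.toNat_of_nonpos hn.le
    rw [h0]
    simp only [List.range_zero, List.map_nil]
    rcases le_or_gt (min n (x + 1)) 0 with h | h
    · rw [max_eq_left h]
      rw [PySem.List.pyRange_one_eq_nil (by omega : n + 1 ≤ 0 + 1)]
      simp
    · exfalso; have := min_le_left n (x + 1); omega
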